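-- pv_equiv track=rewrite | github.com/Ill1dan/Flood-Fill-Python | Flood Fill.py | dfs
-- ===== SOURCE A (Python) =====
-- def dfs(grid, i, j, count):
--     m = len(grid)
--     n = len(grid[0])
--
--     if i < 0 or i >= m or j < 0 or j >= n or grid[i][j] == "+" or grid[i][j] == "#":
--         return
--
--     if grid[i][j] == "D":
--         count[0] += 1
--
--     grid[i][j] = "+"
--     dfs(grid, i + 1, j, count)
--     dfs(grid, i - 1, j, count)
--     dfs(grid, i, j + 1, count)
--     dfs(grid, i, j - 1, count)
--
--     return count
-- ===== SOURCE B (Python) =====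
-- def dfs(grid, i, j, count):
--     m, n = len(grid), len(grid[0])
--     if not (0 <= i < m and 0 <= j < n) or grid[i][j] in ("+", "#"):
--         return None
--     stack = [(i, j)]
--     while stack:
--         ci, cj = stack.pop()
--         if not (0 <= ci < m and 0 <= cj < n) or grid[ci][cj] in ("+", "#"):
--             continue
--         if grid[ci][cj] == "D":
--             count[0] += 1
--         grid[ci][cj] = "+"
--         # pushed so that (ci + 1, cj) is popped first, like the recursive order
--         stack.extend([(ci, cj - 1), (ci, cj + 1), (ci - 1, cj), (ci + 1, cj)])
--     return count
-- ===== Notes on version B (the rewrite author's own statement) =====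
-- stated objective: alternative
-- what changed: The recursive four-way flood fill is replaced by an iterative DFS over an explicit stack: cells are popped, checked, counted and marked in a single loop, with no recursion (so no Python recursion-depth limit).
-- outside the precondition, e.g. on dfs([['x'], ['y', 'z']], 0, 0, [0]): A returns [0], B returns [0]; on dfs([['x']], 0, 0, []): A returns [], B returns []
import Mathlib
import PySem

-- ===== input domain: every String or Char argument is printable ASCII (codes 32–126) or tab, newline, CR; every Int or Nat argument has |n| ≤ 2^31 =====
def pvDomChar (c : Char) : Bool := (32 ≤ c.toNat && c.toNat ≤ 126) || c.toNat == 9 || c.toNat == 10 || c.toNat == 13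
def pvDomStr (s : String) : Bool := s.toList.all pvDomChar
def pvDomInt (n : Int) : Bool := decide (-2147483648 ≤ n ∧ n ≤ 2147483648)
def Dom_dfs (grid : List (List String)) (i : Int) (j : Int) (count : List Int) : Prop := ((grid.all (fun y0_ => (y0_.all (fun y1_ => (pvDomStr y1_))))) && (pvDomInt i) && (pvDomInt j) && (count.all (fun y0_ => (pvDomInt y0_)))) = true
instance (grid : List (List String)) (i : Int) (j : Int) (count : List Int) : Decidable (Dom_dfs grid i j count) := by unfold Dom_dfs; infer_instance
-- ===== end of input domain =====

-- B replaces A's recursive flood fill by an iterative DFS with an explicit stack (same counting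
-- and marking, pop-time checks); both Pythons mutate grid/count identically, the claim is about
-- the RETURN value.

-- shared primitive helpers (Python grid[i][j] read, grid[i][j] = "+", count[0] += 1)
def pvCell (g : List (List String)) (i j : Int) : Option String :=
  (PySem.List.pyGet? g i).bind (fun row => PySem.List.pyGet? row j)

-- grid[ki][kj] = "+" for Nat indices (ports call it with guaranteed-nonneg, in-range i, j)
def pvMarkN : List (List String) → Nat → Nat → List (List String)
  | [], _, _ => []
  | row :: rest, 0, kj => row.set kj "+" :: rest
  | row :: rest, ki + 1, kj => row :: pvMarkN rest ki kj

def pvMark (g : List (List String)) (i j : Int) : List (List String) :=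
  pvMarkN g i.toNat j.toNat

-- count[0] += 1 (Python raises IndexError on []; Pre_ excludes that case)
def pvBump (c : List Int) : List Int :=
  match c with
  | [] => []
  | x :: xs => (x + 1) :: xs

-- number of cells ≠ "+" — termination measure for both ports
def pvRowMu (row : List String) : Nat := (row.filter (fun s => s != "+")).length
def pvMu (g : List (List String)) : Nat := (g.map pvRowMu).sum

-- lemmas the ports' termination/fuel need (cited below by the definitions)
theorem pvRowMu_set_lt (row : List String) (k : Nat) (v : String)
    (hv : row[k]? = some v) (hne : v ≠ "+") :
    pvRowMu (row.set k "+") < pvRowMu row := by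
  induction row generalizing k with
  | nil => simp at hv
  | cons a rest ih =>
    cases k with
    | zero =>
      simp at hv
      subst hv
      simp [pvRowMu, List.filter_cons, hne]
    | succ k =>
      simp at hv
      have := ih k hv
      by_cases h : a = "+" <;> simp [pvRowMu, List.filter_cons, h] at this ⊢ <;> omega

theorem pvMu_cons (row : List String) (rest : List (List String)) :
    pvMu (row :: rest) = pvRowMu row + pvMu rest := by
  simp [pvMu]

theorem pvCell_of_nonneg (g : List (List String)) (i j : Int) (hi : 0 ≤ i) (hj : 0 ≤ j) :
    pvCell g i j = (g[i.toNat]?).bind (fun row => row[j.toNat]?) := by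
  simp [pvCell, PySem.List.pyGet?_of_nonneg _ hi]
  cases g[i.toNat]? with
  | none => rfl
  | some row => simp [PySem.List.pyGet?_of_nonneg _ hj]

theorem pvMu_mark_lt (g : List (List String)) (i j : Int) (hi : 0 ≤ i) (hj : 0 ≤ j)
    (v : String) (hv : pvCell g i j = some v) (hvne : v ≠ "+") :
    pvMu (pvMark g i j) < pvMu g := by
  rw [pvCell_of_nonneg g i j hi hj] at hv
  unfold pvMark
  generalize i.toNat = ki at hv ⊢
  generalize j.toNat = kj at hv ⊢
  induction g generalizing ki with
  | nil => simp at hv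
  | cons row rest ih =>
    cases ki with
    | zero =>
      simp at hv
      simp [pvMarkN, pvMu_cons]
      have := pvRowMu_set_lt row kj v hv hvne
      omega
    | succ ki =>
      simp at hv
      simp [pvMarkN, pvMu_cons]
      have := ih ki hv
      omega

-- ===== PORT A =====
-- A's recursion threads the mutated (grid, count) state; Python's self-terminating recursion is
-- modeled with fuel pvMu grid + 1, which the simulation lemmas below show is never exhausted.
def dfsRec : Nat → List (List String) → Int → Int → List Int → List (List String) × List Int
  | 0, g, _, _, c => (g, c)
  | fl + 1, g, i, j, c =>
    if i < 0 ∨ (g.length : Int) ≤ i ∨ j < 0 ∨ ((g.headD []).length : Int) ≤ j ∨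
        pvCell g i j = some "+" ∨ pvCell g i j = some "#" then (g, c)
    else
      let c1 := if pvCell g i j = some "D" then pvBump c else c
      let g1 := pvMark g i j
      let r1 := dfsRec fl g1 (i + 1) j c1
      let r2 := dfsRec fl r1.1 (i - 1) j r1.2
      let r3 := dfsRec fl r2.1 i (j + 1) r2.2
      let r4 := dfsRec fl r3.1 i (j - 1) r3.2
      r4

def dfs (grid : List (List String)) (i : Int) (j : Int) (count : List Int) : Option (List Int) :=
  if i < 0 ∨ (grid.length : Int) ≤ i ∨ j < 0 ∨ ((grid.headD []).length : Int) ≤ j ∨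
      pvCell grid i j = some "+" ∨ pvCell grid i j = some "#" then none
  else some (dfsRec (pvMu grid + 1) grid i j count).2

-- ===== PORT B =====
-- the while-stack loop; stack head = top. The `pvCell g ci cj = none` skip disjunct corresponds
-- to the in-bounds read on a ragged short row, where the Python raises IndexError (outside Pre_).
def stackLoop : List (List String) → List Int → List (Int × Int) → List (List String) × List Int
  | g, c, [] => (g, c)
  | g, c, (ci, cj) :: rest =>
    if h : ci < 0 ∨ (g.length : Int) ≤ ci ∨ cj < 0 ∨ ((g.headD []).length : Int) ≤ cj ∨
        pvCell g ci cj = none ∨ pvCell g ci cj = some "+" ∨ pvCell g ci cj = some "#" then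
      stackLoop g c rest
    else
      let c1 := if pvCell g ci cj = some "D" then pvBump c else c
      stackLoop (pvMark g ci cj) c1 ((ci + 1, cj) :: (ci - 1, cj) :: (ci, cj + 1) :: (ci, cj - 1) :: rest)
  termination_by g _ stack => (pvMu g, stack.length)
  decreasing_by
  · apply Prod.Lex.right
    simp
  · apply Prod.Lex.left
    push_neg at h
    obtain ⟨h1, _, h3, _, h5, h6, _⟩ := h
    obtain ⟨v, hv⟩ := Option.ne_none_iff_exists'.mp h5
    exact pvMu_mark_lt _ _ _ (by omega) (by omega) v hv (by rintro rfl; exact h6 hv)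

def dfs_alt (grid : List (List String)) (i : Int) (j : Int) (count : List Int) : Option (List Int) :=
  if i < 0 ∨ (grid.length : Int) ≤ i ∨ j < 0 ∨ ((grid.headD []).length : Int) ≤ j ∨
      pvCell grid i j = some "+" ∨ pvCell grid i j = some "#" then none
  else some (stackLoop grid count [(i, j)]).2

-- ===== PRECONDITION & SPEC =====
-- Pre_ excludes the empty grid (len(grid[0]) raises IndexError), ragged grids on which the fill
-- can index past a short row (IndexError), and an empty count list when the fill actually runs
-- (count[0] += 1 can raise IndexError) — unless the start cell is out of bounds or blocked, where
-- A returns None before touching either.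
def Pre_dfs (grid : List (List String)) (i : Int) (j : Int) (count : List Int) : Prop :=
  grid ≠ [] ∧
  ((i < 0 ∨ (grid.length : Int) ≤ i ∨ j < 0 ∨ ((grid.headD []).length : Int) ≤ j) ∨
   pvCell grid i j = some "+" ∨ pvCell grid i j = some "#" ∨
   ((∀ row ∈ grid, row.length = (grid.headD []).length) ∧ count ≠ []))

instance (grid : List (List String)) (i : Int) (j : Int) (count : List Int) : Decidable (Pre_dfs grid i j count) := by unfold Pre_dfs; infer_instance

def pvWitness_dfs : List (List String) × Int × Int × List Int :=
  ([["D", "x"], ["x", "#"]], 0, 0, [0])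

def Spec_dfs (grid : List (List String)) (i : Int) (j : Int) (count : List Int) (out : Option (List Int)) : Prop := out = dfs_alt grid i j count
instance (grid : List (List String)) (i : Int) (j : Int) (count : List Int) (out : Option (List Int)) : Decidable (Spec_dfs grid i j count out) := by unfold Spec_dfs; infer_instance

-- ===== CLAIM (what is proved, stated in full; the proofs are below) =====
def Claim_equal_dfs : Prop := ∀ (grid : List (List String)) (i : Int) (j : Int) (count : List Int), Dom_dfs grid i j count → Pre_dfs grid i j count → Spec_dfs grid i j count (dfs grid i j count)

-- ===== LEMMAS AND PROOFS =====

theorem pvRowMu_set_le (row : List String) (k : Nat) :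
    pvRowMu (row.set k "+") ≤ pvRowMu row := by
  induction row generalizing k with
  | nil => simp [List.set]
  | cons a rest ih =>
    cases k with
    | zero => by_cases h : a = "+" <;> simp [pvRowMu, List.filter_cons, h]
    | succ k =>
      have := ih k
      by_cases h : a = "+" <;> simp [pvRowMu, List.filter_cons, h] at this ⊢ <;> omega


theorem pvMu_markN_le (g : List (List String)) (ki kj : Nat) :
    pvMu (pvMarkN g ki kj) ≤ pvMu g := by
  induction g generalizing ki with
  | nil => simp [pvMarkN]
  | cons row rest ih =>
    cases ki with
    | zero =>
      simp [pvMarkN, pvMu_cons]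
      have := pvRowMu_set_le row kj
      omega
    | succ ki =>
      simp [pvMarkN, pvMu_cons]
      have := ih ki
      omega


-- rectangularity as a property of the shape (row-length list) only
def pvRectS (s : List Nat) : Prop := ∀ x ∈ s, x = s.headD 0

theorem pvRectS_of_pre (g : List (List String))
    (h : ∀ row ∈ g, row.length = (g.headD []).length) :
    pvRectS (g.map List.length) := by
  intro x hx
  obtain ⟨row, hrow, rfl⟩ := List.mem_map.mp hx
  cases g with
  | nil => simp at hrow
  | cons r rest => simpa using h row hrow

theorem pvMarkN_shape (g : List (List String)) (ki kj : Nat) :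
    (pvMarkN g ki kj).map List.length = g.map List.length := by
  induction g generalizing ki with
  | nil => simp [pvMarkN]
  | cons row rest ih =>
    cases ki with
    | zero => simp [pvMarkN]
    | succ ki => simp [pvMarkN, ih ki]

theorem dfsRec_shape (fl : Nat) :
    ∀ (g : List (List String)) (i j : Int) (c : List Int),
      (dfsRec fl g i j c).1.map List.length = g.map List.length := by
  induction fl with
  | zero => intro g i j c; simp [dfsRec]
  | succ fl ih =>
    intro g i j c
    rw [dfsRec]
    split
    · rfl
    · simp only []
      rw [ih, ih, ih, ih, pvMark, pvMarkN_shape]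

theorem dfsRec_mu_le (fl : Nat) :
    ∀ (g : List (List String)) (i j : Int) (c : List Int),
      pvMu (dfsRec fl g i j c).1 ≤ pvMu g := by
  induction fl with
  | zero => intro g i j c; simp [dfsRec]
  | succ fl ih =>
    intro g i j c
    rw [dfsRec]
    split
    · exact le_refl _
    · simp only []
      calc pvMu (dfsRec fl (dfsRec fl (dfsRec fl (dfsRec fl (pvMark g i j) (i+1) j _).1 (i-1) j _).1 i (j+1) _).1 i (j-1) _).1
          ≤ pvMu (dfsRec fl (dfsRec fl (dfsRec fl (pvMark g i j) (i+1) j _).1 (i-1) j _).1 i (j+1) _).1 := ih _ _ _ _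
        _ ≤ pvMu (dfsRec fl (dfsRec fl (pvMark g i j) (i+1) j _).1 (i-1) j _).1 := ih _ _ _ _
        _ ≤ pvMu (dfsRec fl (pvMark g i j) (i+1) j _).1 := ih _ _ _ _
        _ ≤ pvMu (pvMark g i j) := ih _ _ _ _
        _ ≤ pvMu g := pvMu_markN_le _ _ _

theorem pvCell_some_of_rect (g : List (List String)) (i j : Int)
    (hr : pvRectS (g.map List.length))
    (hi : 0 ≤ i) (hilt : i < (g.length : Int))
    (hj : 0 ≤ j) (hjlt : j < ((g.headD []).length : Int)) :
    ∃ v, pvCell g i j = some v := by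
  rw [pvCell_of_nonneg g i j hi hj]
  have hiN : i.toNat < g.length := by omega
  obtain ⟨row, hrow⟩ : ∃ row, g[i.toNat]? = some row := ⟨g[i.toNat], List.getElem?_eq_getElem hiN⟩
  have hmem : row ∈ g := by
    exact List.mem_of_getElem? hrow
  have hlen : row.length = (g.map List.length).headD 0 :=
    hr row.length (List.mem_map.mpr ⟨row, hmem, rfl⟩)
  have hhead : (g.map List.length).headD 0 = (g.headD []).length := by
    cases g <;> simp
  have hjN : j.toNat < row.length := by
    rw [hlen, hhead]; omega
  exact ⟨row[j.toNat], by rw [hrow]; simp [List.getElem?_eq_getElem hjN]⟩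

-- the explicit stack simulates the recursion: processing the popped cell (i, j) with enough fuel
-- equals running A's recursive call at (i, j) and continuing with the rest of the stack
theorem pvSim (fl : Nat) :
    ∀ (g : List (List String)), pvMu g < fl → pvRectS (g.map List.length) →
      ∀ (i j : Int) (c : List Int) (rest : List (Int × Int)),
        stackLoop g c ((i, j) :: rest) =
          stackLoop (dfsRec fl g i j c).1 (dfsRec fl g i j c).2 rest := by
  induction fl with
  | zero => intro g hmu; omega
  | succ fl ih =>
    intro g hmu hrect i j c rest
    rw [dfsRec, stackLoop]
    by_cases hG : i < 0 ∨ (g.length : Int) ≤ i ∨ j < 0 ∨ ((g.headD []).length : Int) ≤ j ∨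
        pvCell g i j = some "+" ∨ pvCell g i j = some "#"
    · -- guard fires in both: the recursion returns (g, c), the loop skips the cell
      have hG' : i < 0 ∨ (g.length : Int) ≤ i ∨ j < 0 ∨ ((g.headD []).length : Int) ≤ j ∨
          pvCell g i j = none ∨ pvCell g i j = some "+" ∨ pvCell g i j = some "#" := by tauto
      rw [dif_pos hG', if_pos hG]
    · push_neg at hG
      obtain ⟨h1, h2, h3, h4, h5, h6⟩ := hG
      obtain ⟨v, hv⟩ := pvCell_some_of_rect g i j hrect h1 (by omega) h3 (by omega)
      have hG' : ¬ (i < 0 ∨ (g.length : Int) ≤ i ∨ j < 0 ∨ ((g.headD []).length : Int) ≤ j ∨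
          pvCell g i j = none ∨ pvCell g i j = some "+" ∨ pvCell g i j = some "#") := by
        push_neg
        exact ⟨h1, h2, h3, h4, by simp [hv], h5, h6⟩
      have hGn : ¬ (i < 0 ∨ (g.length : Int) ≤ i ∨ j < 0 ∨ ((g.headD []).length : Int) ≤ j ∨
          pvCell g i j = some "+" ∨ pvCell g i j = some "#") := by
        push_neg
        exact ⟨h1, h2, h3, h4, h5, h6⟩
      rw [dif_neg hG', if_neg hGn]
      simp only []
      -- names for the marked grid and the four chained recursive results
      set c1 := if pvCell g i j = some "D" then pvBump c else c with hc1
      set g1 := pvMark g i j with hg1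
      have hvne : v ≠ "+" := by rintro rfl; exact h5 hv
      have hmu1 : pvMu g1 < pvMu g := pvMu_mark_lt g i j h1 h3 v hv hvne
      have hsh1 : g1.map List.length = g.map List.length := pvMarkN_shape g _ _
      have hrect1 : pvRectS (g1.map List.length) := by rw [hsh1]; exact hrect
      -- step 1
      have e1 := ih g1 (by omega) hrect1 (i + 1) j c1
        ((i - 1, j) :: (i, j + 1) :: (i, j - 1) :: rest)
      set r1 := dfsRec fl g1 (i + 1) j c1 with hr1
      have hsh2 : r1.1.map List.length = g.map List.length := by rw [hr1, dfsRec_shape, hsh1]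
      have hrect2 : pvRectS (r1.1.map List.length) := by rw [hsh2]; exact hrect
      have hmu2 : pvMu r1.1 ≤ pvMu g1 := dfsRec_mu_le fl g1 (i + 1) j c1
      -- step 2
      have e2 := ih r1.1 (by omega) hrect2 (i - 1) j r1.2 ((i, j + 1) :: (i, j - 1) :: rest)
      set r2 := dfsRec fl r1.1 (i - 1) j r1.2 with hr2
      have hsh3 : r2.1.map List.length = g.map List.length := by rw [hr2, dfsRec_shape, hsh2]
      have hrect3 : pvRectS (r2.1.map List.length) := by rw [hsh3]; exact hrect
      have hmu3 : pvMu r2.1 ≤ pvMu r1.1 := dfsRec_mu_le fl r1.1 (i - 1) j r1.2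
      -- step 3
      have e3 := ih r2.1 (by omega) hrect3 i (j + 1) r2.2 ((i, j - 1) :: rest)
      set r3 := dfsRec fl r2.1 i (j + 1) r2.2 with hr3
      have hsh4 : r3.1.map List.length = g.map List.length := by rw [hr3, dfsRec_shape, hsh3]
      have hrect4 : pvRectS (r3.1.map List.length) := by rw [hsh4]; exact hrect
      have hmu4 : pvMu r3.1 ≤ pvMu r2.1 := dfsRec_mu_le fl r2.1 i (j + 1) r2.2
      -- step 4
      have e4 := ih r3.1 (by omega) hrect4 i (j - 1) r3.2 rest
      rw [e1, e2, e3, e4]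

-- ===== VERDICT (by name: the statement is the Claim_ definition above) =====
theorem dfs_spec : Claim_equal_dfs := by
  intro grid i j count _hdom hpre
  unfold Spec_dfs dfs dfs_alt
  by_cases hG : i < 0 ∨ (grid.length : Int) ≤ i ∨ j < 0 ∨ ((grid.headD []).length : Int) ≤ j ∨
      pvCell grid i j = some "+" ∨ pvCell grid i j = some "#"
  · rw [if_pos hG, if_pos hG]
  · rw [if_neg hG, if_neg hG]
    obtain ⟨_, hpre2⟩ := hpre
    push_neg at hG
    obtain ⟨h1, h2, h3, h4, h5, h6⟩ := hG
    have hrect : pvRectS (grid.map List.length) := by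
      rcases hpre2 with hoob | hplus | hhash | ⟨hr, _⟩
      · omega
      · exact absurd hplus h5
      · exact absurd hhash h6
      · exact pvRectS_of_pre grid hr
    have := pvSim (pvMu grid + 1) grid (by omega) hrect i j count []
    rw [this, stackLoop]
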